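-- pv_equiv track=rewrite | github.com/re757575/gae_python_django | lib/helper.py | helper_pager
-- ===== SOURCE A (Python) =====
-- import math
--
-- def helper_pager(current_page, total, limit, params):
--
--     total_page = int(math.ceil(float(total) / float(limit)))
--
--     query_params = ''
--     for key in params:
--         if params[key]:
--             query_params += "&{key}={val}".format(key=key, val=params[key])
--
--     # previous
--     if current_page > 1:
--         previous = '<li class="waves-effect"><a href="/customers?current_page=' + \
--             str(current_page - 1) + query_params + \
--             '"><i class="material-icons">chevron_left</i></a></li>'
--     else:
--         previous = '<li class="disabled"><a href="javascript:;"><i class="material-icons">chevron_left</i></a></li>'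
--
--     # main page
--     step = 3
--     page = ''
--     # 縮短顯示分頁
--     if (total_page > step * 2):
--
--         # 所顯示的頁數編號
--         page_range = [1, total_page]
--         for i in range(current_page - step, current_page + step + 1, 1):
--             page_range.append(i)
--
--         for page_conut in range(1, total_page + 1, 1):
--             if page_conut in page_range:
--                 if page_conut == 1 and (current_page - step) > 1 and (current_page - step - 1) != 1:
--                     page += '<li class="waves-effect"><a href="/customers?current_page=' + \
--                         str(page_conut) + query_params + '">' + \
--                         str(page_conut) + '</a></li>\n'
--                     page += '<li class="disabled"><a href="javascript:;">...</a></li>\n'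
--                 elif page_conut == current_page:
--                     page += '<li class="active"><a href="/customers?current_page=' + \
--                         str(page_conut) + query_params + '">' + \
--                         str(page_conut) + '</a></li>\n'
--                 elif page_conut == total_page and (current_page + step) < total_page and (current_page + step + 1) != total_page:
--                     page += '<li class="disabled"><a href="javascript:;">...</a></li>\n'
--                     page += '<li class="waves-effect"><a href="/customers?current_page=' + \
--                         str(page_conut) + query_params + '">' + \
--                         str(page_conut) + '</a></li>\n'
--                 else:
--                     page += '<li class="waves-effect"><a href="/customers?current_page=' + \
--                         str(page_conut) + query_params + '">' + \
--                         str(page_conut) + '</a></li>\n'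
--     else:
--         for page_conut in range(1, total_page + 1, 1):
--             if page_conut == current_page:
--                 page += '<li class="active"><a href="/customers?current_page=' + \
--                     str(page_conut) + query_params + '">' + \
--                     str(page_conut) + '</a></li>\n'
--             else:
--                 page += '<li class="waves-effect"><a href="/customers?current_page=' + \
--                     str(page_conut) + query_params + '">' + \
--                     str(page_conut) + '</a></li>\n'
--
--     # next
--     if current_page >= total_page:
--         next = '<li class="disabled"><a href="javascript:;"><i class="material-icons">chevron_right</i></a></li>'
--     else:
--         next = '<li class="waves-effect"><a href="/customers?current_page=' + \
--             str(current_page + 1) + query_params + \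
--             '"><i class="material-icons">chevron_right</i></a></li>'
--
--     pager = '''
--             <ul class="pagination">
--                 ''' + previous + page + next + '''
--             </ul>
--         '''
--
--     return pager
-- ===== SOURCE B (Python) =====
-- import math
--
-- _ELLIPSIS = '<li class="disabled"><a href="javascript:;">...</a></li>\n'
--
--
-- def helper_pager(current_page, total, limit, params):
--     total_page = int(math.ceil(float(total) / float(limit)))
--     query_params = ''.join('&{}={}'.format(k, v) for k, v in params.items() if v)
--
--     def li(p):
--         cls = 'active' if p == current_page else 'waves-effect'
--         return ('<li class="' + cls + '"><a href="/customers?current_page=' +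
--                 str(p) + query_params + '">' + str(p) + '</a></li>\n')
--
--     # which page numbers are displayed
--     if total_page > 6:
--         shown = sorted({1, total_page} |
--                        {p for p in range(current_page - 3, current_page + 4)
--                         if 1 <= p <= total_page})
--     else:
--         shown = list(range(1, total_page + 1))
--
--     # one rendering pass; a gap between consecutive shown pages becomes '...'
--     page = ''
--     prev = None
--     for p in shown:
--         if prev is not None and p - prev > 1:
--             page += _ELLIPSIS
--         page += li(p)
--         prev = p
--
--     if current_page > 1:
--         previous = ('<li class="waves-effect"><a href="/customers?current_page=' +
--                     str(current_page - 1) + query_params +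
--                     '"><i class="material-icons">chevron_left</i></a></li>')
--     else:
--         previous = '<li class="disabled"><a href="javascript:;"><i class="material-icons">chevron_left</i></a></li>'
--
--     if current_page >= total_page:
--         next = '<li class="disabled"><a href="javascript:;"><i class="material-icons">chevron_right</i></a></li>'
--     else:
--         next = ('<li class="waves-effect"><a href="/customers?current_page=' +
--                 str(current_page + 1) + query_params +
--                 '"><i class="material-icons">chevron_right</i></a></li>')
--
--     return ('\n            <ul class="pagination">\n                ' +
--             previous + page + next + '\n            </ul>\n        ')
-- ===== Notes on version B (the rewrite author's own statement) =====
-- stated objective: simpler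
-- what changed: B first computes the list of displayed page numbers (sorted union of {1, total_page} and the clamped current_page+-3 window, or simply 1..total_page when total_page <= 6) and renders it in one pass that inserts the '...' item whenever consecutive displayed pages differ by more than 1, instead of A's scan over every page 1..total_page with a page_range membership test and positional ellipsis conditions at page 1 and at total_page.
import Mathlib
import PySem

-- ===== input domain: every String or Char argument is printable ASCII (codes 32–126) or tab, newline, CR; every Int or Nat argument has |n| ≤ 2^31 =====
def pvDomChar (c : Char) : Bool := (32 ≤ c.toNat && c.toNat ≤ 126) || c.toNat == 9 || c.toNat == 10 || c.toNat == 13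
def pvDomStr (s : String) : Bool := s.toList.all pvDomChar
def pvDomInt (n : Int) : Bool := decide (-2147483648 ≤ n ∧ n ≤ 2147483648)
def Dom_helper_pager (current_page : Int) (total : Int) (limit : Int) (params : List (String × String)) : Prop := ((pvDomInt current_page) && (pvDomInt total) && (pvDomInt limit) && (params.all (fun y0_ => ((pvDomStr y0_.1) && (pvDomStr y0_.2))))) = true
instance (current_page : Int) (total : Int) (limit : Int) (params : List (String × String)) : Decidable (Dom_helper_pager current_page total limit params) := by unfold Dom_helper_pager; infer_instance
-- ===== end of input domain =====

-- B rebuilds the pagination as "compute the displayed page list, then one gap-driven rendering pass"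
-- instead of A's scan of every page number with positional ellipsis conditions (objective: simpler).

-- shared by both ports: exact port of `int(math.ceil(float(total) / float(limit)))` — the ceiling of
-- total/limit, exact for |total|, |limit| ≤ 2^31 (both sources contain this same line); limit ≠ 0 in Pre_.
def pvCeilDiv (a b : Int) : Int := -(PySem.Int.floordiv (-a) b)

-- shared by both ports: the previous/next chevron links (this code is byte-identical in both sources)
def pvPrev (current_page : Int) (q : String) : String :=
  if current_page > 1 then
    "<li class=\"waves-effect\"><a href=\"/customers?current_page=" ++ PySem.Int.toStr (current_page - 1) ++ q
      ++ "\"><i class=\"material-icons\">chevron_left</i></a></li>"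
  else
    "<li class=\"disabled\"><a href=\"javascript:;\"><i class=\"material-icons\">chevron_left</i></a></li>"

def pvNext (current_page : Int) (total_page : Int) (q : String) : String :=
  if current_page ≥ total_page then
    "<li class=\"disabled\"><a href=\"javascript:;\"><i class=\"material-icons\">chevron_right</i></a></li>"
  else
    "<li class=\"waves-effect\"><a href=\"/customers?current_page=" ++ PySem.Int.toStr (current_page + 1) ++ q
      ++ "\"><i class=\"material-icons\">chevron_right</i></a></li>"

-- ===== PORT A =====
def pvA_query (params : List (String × String)) : String :=
  ((PySem.Dict.ofList params).items).foldl
    (fun acc kv => if kv.2 ≠ "" then acc ++ ("&" ++ kv.1 ++ "=" ++ kv.2) else acc) ""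

def pvA_page (current_page : Int) (total_page : Int) (q : String) : String :=
  let step : Int := 3
  if total_page > step * 2 then
    let page_range : List Int := [1, total_page] ++ PySem.List.pyRange (current_page - step) (current_page + step + 1)
    (PySem.List.pyRange 1 (total_page + 1)).foldl (fun acc p =>
      if page_range.contains p then
        if p = 1 ∧ current_page - step > 1 ∧ current_page - step - 1 ≠ 1 then
          (acc ++ ("<li class=\"waves-effect\"><a href=\"/customers?current_page=" ++ PySem.Int.toStr p ++ q
              ++ "\">" ++ PySem.Int.toStr p ++ "</a></li>\n"))
            ++ "<li class=\"disabled\"><a href=\"javascript:;\">...</a></li>\n"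
        else if p = current_page then
          acc ++ ("<li class=\"active\"><a href=\"/customers?current_page=" ++ PySem.Int.toStr p ++ q
              ++ "\">" ++ PySem.Int.toStr p ++ "</a></li>\n")
        else if p = total_page ∧ current_page + step < total_page ∧ current_page + step + 1 ≠ total_page then
          (acc ++ "<li class=\"disabled\"><a href=\"javascript:;\">...</a></li>\n")
            ++ ("<li class=\"waves-effect\"><a href=\"/customers?current_page=" ++ PySem.Int.toStr p ++ q
              ++ "\">" ++ PySem.Int.toStr p ++ "</a></li>\n")
        else
          acc ++ ("<li class=\"waves-effect\"><a href=\"/customers?current_page=" ++ PySem.Int.toStr p ++ q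
              ++ "\">" ++ PySem.Int.toStr p ++ "</a></li>\n")
      else acc) ""
  else
    (PySem.List.pyRange 1 (total_page + 1)).foldl (fun acc p =>
      if p = current_page then
        acc ++ ("<li class=\"active\"><a href=\"/customers?current_page=" ++ PySem.Int.toStr p ++ q
            ++ "\">" ++ PySem.Int.toStr p ++ "</a></li>\n")
      else
        acc ++ ("<li class=\"waves-effect\"><a href=\"/customers?current_page=" ++ PySem.Int.toStr p ++ q
            ++ "\">" ++ PySem.Int.toStr p ++ "</a></li>\n")) ""

def helper_pager (current_page : Int) (total : Int) (limit : Int) (params : List (String × String)) : String :=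
  let total_page := pvCeilDiv total limit
  let query_params := pvA_query params
  let previous := pvPrev current_page query_params
  let page := pvA_page current_page total_page query_params
  let next := pvNext current_page total_page query_params
  (((("\n            <ul class=\"pagination\">\n                " ++ previous) ++ page) ++ next)
    ++ "\n            </ul>\n        ")

-- ===== PORT B =====
def pvB_ellipsis : String := "<li class=\"disabled\"><a href=\"javascript:;\">...</a></li>\n"

def pvB_query (params : List (String × String)) : String :=
  PySem.Str.join ""
    ((((PySem.Dict.ofList params).items).filter (fun kv => kv.2 != "")).map
      (fun kv => "&" ++ kv.1 ++ "=" ++ kv.2))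

def pvB_li (current_page : Int) (q : String) (p : Int) : String :=
  let cls := if p = current_page then "active" else "waves-effect"
  "<li class=\"" ++ cls ++ "\"><a href=\"/customers?current_page=" ++ PySem.Int.toStr p ++ q
    ++ "\">" ++ PySem.Int.toStr p ++ "</a></li>\n"

def pvB_shown (current_page : Int) (total_page : Int) : List Int :=
  if total_page > 6 then
    PySem.List.sorted
      (PySem.Set.union (PySem.Set.ofList [1, total_page])
        (PySem.Set.ofList
          ((PySem.List.pyRange (current_page - 3) (current_page + 4)).filter
            (fun p => decide (1 ≤ p) && decide (p ≤ total_page)))))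
      (fun x => x)
  else
    PySem.List.pyRange 1 (total_page + 1)

def pvB_page (current_page : Int) (total_page : Int) (q : String) : String :=
  ((pvB_shown current_page total_page).foldl
    (fun (st : String × Option Int) p =>
      ((st.1 ++ (match st.2 with
          | some prev => if p - prev > 1 then pvB_ellipsis else ""
          | none => "")) ++ pvB_li current_page q p, some p))
    ("", none)).1

def helper_pager_alt (current_page : Int) (total : Int) (limit : Int) (params : List (String × String)) : String :=
  let total_page := pvCeilDiv total limit
  let query_params := pvB_query params
  let page := pvB_page current_page total_page query_params
  let previous := pvPrev current_page query_params
  let next := pvNext current_page total_page query_params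
  (((("\n            <ul class=\"pagination\">\n                " ++ previous) ++ page) ++ next)
    ++ "\n            </ul>\n        ")

-- ===== PRECONDITION & SPEC =====
-- Pre_ excludes exactly limit = 0, where the Python A raises ZeroDivisionError.
def Pre_helper_pager (current_page : Int) (total : Int) (limit : Int) (params : List (String × String)) : Prop :=
  limit ≠ 0
instance (current_page : Int) (total : Int) (limit : Int) (params : List (String × String)) : Decidable (Pre_helper_pager current_page total limit params) := by unfold Pre_helper_pager; infer_instance

def pvWitness_helper_pager : Int × Int × Int × (List (String × String)) := (2, 10, 3, [("a", "1")])

def Spec_helper_pager (current_page : Int) (total : Int) (limit : Int) (params : List (String × String)) (out : String) : Prop := out = helper_pager_alt current_page total limit params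
instance (current_page : Int) (total : Int) (limit : Int) (params : List (String × String)) (out : String) : Decidable (Spec_helper_pager current_page total limit params out) := by unfold Spec_helper_pager; infer_instance

-- ===== CLAIM (what is proved, stated in full; the proofs are below) =====
def Claim_equal_helper_pager : Prop := ∀ (current_page : Int) (total : Int) (limit : Int) (params : List (String × String)), Dom_helper_pager current_page total limit params → Pre_helper_pager current_page total limit params → Spec_helper_pager current_page total limit params (helper_pager current_page total limit params)

-- ===== LEMMAS AND PROOFS =====

-- the two <li> strings and the item a page number renders as
def pvWav (q : String) (p : Int) : String :=
  "<li class=\"waves-effect\"><a href=\"/customers?current_page=" ++ PySem.Int.toStr p ++ q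
    ++ "\">" ++ PySem.Int.toStr p ++ "</a></li>\n"
def pvAct (q : String) (p : Int) : String :=
  "<li class=\"active\"><a href=\"/customers?current_page=" ++ PySem.Int.toStr p ++ q
    ++ "\">" ++ PySem.Int.toStr p ++ "</a></li>\n"
def pvItem (c : Int) (q : String) (p : Int) : String := if p = c then pvAct q p else pvWav q p
def pvRun (c : Int) (q : String) (l : List Int) : String :=
  l.foldl (fun a p => a ++ pvItem c q p) ""

theorem pvB_li_eq (c : Int) (q : String) (p : Int) : pvB_li c q p = pvItem c q p := by
  unfold pvB_li pvItem pvAct pvWav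
  by_cases h : p = c <;> simp only [h, if_true, if_pos, if_neg, ite_true, ite_false] <;> first | rfl | (simp [h])

theorem pv_foldl_strAcc {α : Type} (f : α → String) (l : List α) (acc : String) :
    l.foldl (fun a p => a ++ f p) acc = acc ++ l.foldl (fun a p => a ++ f p) "" := by
  induction l generalizing acc with
  | nil => simp [String.append_empty]
  | cons x t ih =>
    simp only [List.foldl_cons]
    rw [ih (acc ++ f x), ih ("" ++ f x), String.append_assoc]
    simp [String.empty_append]

theorem pvRun_nil (c : Int) (q : String) : pvRun c q [] = "" := rfl

theorem pvRun_cons (c : Int) (q : String) (x : Int) (l : List Int) :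
    pvRun c q (x :: l) = pvItem c q x ++ pvRun c q l := by
  unfold pvRun
  simp only [List.foldl_cons]
  rw [pv_foldl_strAcc]
  simp [String.empty_append]

-- ''.join(parts) is string concatenation
theorem pv_join_empty (L : List String) :
    PySem.Str.join "" L = L.foldl (· ++ ·) "" := by
  apply String.ext
  rw [PySem.Str.toList_join]
  induction L with
  | nil => simp [PySem.Chars.join_nil]
  | cons p rest ih =>
    cases rest with
    | nil => simp [PySem.Chars.join_singleton, String.empty_append]
    | cons r t =>
      simp only [List.map_cons] at ih ⊢
      rw [PySem.Chars.join_cons_cons, ih]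
      show _ ++ _ ++ _ = (List.foldl (· ++ ·) ("" ++ p) (r :: t)).toList
      rw [pv_foldl_strAcc (fun s : String => s) (r :: t) ("" ++ p)]
      simp [String.empty_append, String.toList_append]

theorem pv_query_eq (params : List (String × String)) : pvA_query params = pvB_query params := by
  unfold pvA_query pvB_query
  rw [PySem.List.foldl_ite_eq_foldl_filter (p := fun kv : String × String => kv.2 ≠ "")
      (f := fun acc kv => acc ++ ("&" ++ kv.1 ++ "=" ++ kv.2))]
  rw [pv_join_empty, List.foldl_map]
  congr 1
  exact List.filter_congr (fun kv _ => by by_cases h : kv.2 = "" <;> simp [h, bne])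

-- the gap-driven rendering step of B
def pvGapStep (c : Int) (q : String) : (String × Option Int) → Int → (String × Option Int) :=
  fun st p =>
    ((st.1 ++ (match st.2 with
        | some prev => if p - prev > 1 then pvB_ellipsis else ""
        | none => "")) ++ pvB_li c q p, some p)

theorem pvB_page_eq_gap (c T : Int) (q : String) :
    pvB_page c T q = ((pvB_shown c T).foldl (pvGapStep c q) ("", none)).1 := rfl

-- a run of consecutive page numbers: one possible ellipsis in front, then the items
theorem pv_gapRun (c : Int) (q : String) :
    ∀ (n : Nat) (lo b pr : Int) (acc : String), b = lo + n + 1 →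
      (PySem.List.pyRange lo b).foldl (pvGapStep c q) (acc, some pr)
        = ((acc ++ (if lo - pr > 1 then pvB_ellipsis else ""))
            ++ pvRun c q (PySem.List.pyRange lo b), some (b - 1)) := by
  intro n
  induction n with
  | zero =>
    intro lo b pr acc hb
    have hlt : lo < b := by omega
    rw [PySem.List.pyRange_one_cons hlt]
    have h2 : PySem.List.pyRange (lo + 1) b = [] := PySem.List.pyRange_one_eq_nil (by omega)
    rw [h2]
    simp only [List.foldl_cons, List.foldl_nil, pvGapStep, pvRun_cons, pvRun_nil,
      Prod.mk.injEq, Option.some.injEq]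
    refine ⟨?_, by omega⟩
    rw [pvB_li_eq]
    simp [String.append_empty, String.append_assoc]
  | succ n ih =>
    intro lo b pr acc hb
    have hlt : lo < b := by omega
    rw [PySem.List.pyRange_one_cons hlt]
    simp only [List.foldl_cons, pvGapStep]
    rw [ih (lo + 1) b lo ((acc ++ (if lo - pr > 1 then pvB_ellipsis else "")) ++ pvB_li c q lo)
      (by omega)]
    rw [if_neg (by omega : ¬ (lo + 1 - lo > 1))]
    simp only [Prod.mk.injEq]
    refine ⟨?_, by trivial⟩
    rw [pvRun_cons, pvB_li_eq]
    simp [String.empty_append, String.append_empty, String.append_assoc]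

-- the list of displayed pages, in the shortened (total_page > 6) mode
theorem pv_shown_big (c T : Int) (hT : 6 < T) :
    pvB_shown c T = [1] ++ PySem.List.pyRange (max 2 (c - 3)) (min (T - 1) (c + 3) + 1) ++ [T] := by
  unfold pvB_shown
  rw [if_pos hT]
  have hpw : List.Pairwise (fun a b : Int => a < b)
      ([1] ++ PySem.List.pyRange (max 2 (c - 3)) (min (T - 1) (c + 3) + 1) ++ [T]) := by
    refine List.pairwise_append.2 ⟨List.pairwise_append.2
      ⟨by simp, PySem.List.pairwise_lt_pyRange_one _ _, ?_⟩, by simp, ?_⟩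
    · intro a ha b hb
      simp only [List.mem_cons, List.not_mem_nil, or_false] at ha
      rw [PySem.List.mem_pyRange_one] at hb
      omega
    · intro a ha b hb
      simp only [List.mem_cons, List.not_mem_nil, or_false] at hb
      simp only [List.mem_append, List.mem_cons, List.not_mem_nil, or_false,
        PySem.List.mem_pyRange_one] at ha
      omega
  apply PySem.List.sorted_eq_of_perm_of_pairwise_lt
  · rw [List.perm_ext_iff_of_nodup
      (hpw.imp (fun h => ne_of_lt h))
      (PySem.Set.nodup_union _ _ (PySem.Set.nodup_ofList _))]
    intro y
    simp only [PySem.Set.mem_union, PySem.Set.mem_ofList, List.mem_filter,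
      PySem.List.mem_pyRange_one, List.mem_append, List.mem_cons,
      List.not_mem_nil, or_false, Bool.and_eq_true, decide_eq_true_eq]
    constructor
    · intro h; omega
    · intro h; omega
  · exact hpw

-- the pages A keeps from its 1..total_page scan are exactly the displayed ones
theorem pv_filter_big (c T : Int) (hT : 6 < T) :
    (PySem.List.pyRange 1 (T + 1)).filter
        (fun p => ([1, T] ++ PySem.List.pyRange (c - 3) (c + 3 + 1)).contains p)
      = [1] ++ PySem.List.pyRange (max 2 (c - 3)) (min (T - 1) (c + 3) + 1) ++ [T] := by
  have hpred : ∀ p : Int, (([1, T] ++ PySem.List.pyRange (c - 3) (c + 3 + 1)).contains p)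
      = decide (p = 1 ∨ p = T ∨ (c - 3 ≤ p ∧ p < c + 4)) := by
    intro p
    rw [List.contains_eq_mem]
    simp only [List.mem_append, List.mem_cons, List.mem_singleton, List.not_mem_nil, or_false,
      PySem.List.mem_pyRange_one]
    congr 1
    apply propext
    constructor
    · intro h; omega
    · intro h; omega
  have hfself : ∀ a b : Int, (∀ p, a ≤ p → p < b →
        (p = 1 ∨ p = T ∨ (c - 3 ≤ p ∧ p < c + 4)))
      → (PySem.List.pyRange a b).filter
          (fun p => decide (p = 1 ∨ p = T ∨ (c - 3 ≤ p ∧ p < c + 4))) = PySem.List.pyRange a b := by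
    intro a b h
    apply List.filter_eq_self.2
    intro p hp
    rw [PySem.List.mem_pyRange_one] at hp
    simpa using h p hp.1 hp.2
  have hfnil : ∀ a b : Int, (∀ p, a ≤ p → p < b →
        ¬ (p = 1 ∨ p = T ∨ (c - 3 ≤ p ∧ p < c + 4)))
      → (PySem.List.pyRange a b).filter
          (fun p => decide (p = 1 ∨ p = T ∨ (c - 3 ≤ p ∧ p < c + 4))) = [] := by
    intro a b h
    apply List.filter_eq_nil_iff.2
    intro p hp
    rw [PySem.List.mem_pyRange_one] at hp
    simpa using h p hp.1 hp.2
  simp only [funext hpred]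
  by_cases hA : c + 3 ≤ 1
  · -- window entirely below the pages
    have hmid : PySem.List.pyRange (max 2 (c - 3)) (min (T - 1) (c + 3) + 1) = [] := by
      apply PySem.List.pyRange_one_eq_nil; omega
    rw [hmid]
    rw [PySem.List.pyRange_one_append 1 2 (T + 1) (by omega) (by omega),
        PySem.List.pyRange_one_append 2 T (T + 1) (by omega) (by omega)]
    simp only [List.filter_append]
    rw [hfnil 2 T (by intro p h1 h2; omega)]
    rw [(by decide : PySem.List.pyRange (1 : Int) 2 = [1]), PySem.List.pyRange_one_singleton]
    simp
  · by_cases hB : T ≤ c - 3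
    · -- window entirely above the pages
      have hmid : PySem.List.pyRange (max 2 (c - 3)) (min (T - 1) (c + 3) + 1) = [] := by
        apply PySem.List.pyRange_one_eq_nil; omega
      rw [hmid]
      rw [PySem.List.pyRange_one_append 1 2 (T + 1) (by omega) (by omega),
          PySem.List.pyRange_one_append 2 T (T + 1) (by omega) (by omega)]
      simp only [List.filter_append]
      rw [hfnil 2 T (by intro p h1 h2; omega)]
      rw [(by decide : PySem.List.pyRange (1 : Int) 2 = [1]), PySem.List.pyRange_one_singleton]
      simp
    · -- window overlaps 2..T-1
      have h2m1 : (2 : Int) ≤ max 2 (c - 3) := by omega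
      have hm1m2 : max 2 (c - 3) ≤ min (T - 1) (c + 3) + 1 := by omega
      have hm2T : min (T - 1) (c + 3) + 1 ≤ T := by omega
      rw [PySem.List.pyRange_one_append 1 2 (T + 1) (by omega) (by omega),
          PySem.List.pyRange_one_append 2 (max 2 (c - 3)) (T + 1) h2m1 (by omega),
          PySem.List.pyRange_one_append (max 2 (c - 3)) (min (T - 1) (c + 3) + 1) (T + 1) hm1m2 (by omega),
          PySem.List.pyRange_one_append (min (T - 1) (c + 3) + 1) T (T + 1) hm2T (by omega)]
      simp only [List.filter_append]
      rw [hfnil 2 (max 2 (c - 3)) (by intro p h1 h2; omega),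
          hfnil (min (T - 1) (c + 3) + 1) T (by intro p h1 h2; omega),
          hfself (max 2 (c - 3)) (min (T - 1) (c + 3) + 1) (by intro p h1 h2; omega)]
      rw [(by decide : PySem.List.pyRange (1 : Int) 2 = [1]), PySem.List.pyRange_one_singleton]
      simp

-- the common closed form of the shortened page strip
def pvClosed (c T : Int) (q : String) : String :=
  pvItem c q 1 ++ (if 3 ≤ max 2 (c - 3) then pvB_ellipsis else "")
    ++ pvRun c q (PySem.List.pyRange (max 2 (c - 3)) (min (T - 1) (c + 3) + 1))
    ++ (if min (T - 1) (c + 3) ≤ T - 2 then pvB_ellipsis else "")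
    ++ pvItem c q T

-- the per-kept-page emission of A's shortened-mode loop, named for the proofs
def pvEmitA (c T : Int) (q : String) (acc : String) (p : Int) : String :=
  if p = 1 ∧ c - 3 > 1 ∧ c - 3 - 1 ≠ 1 then
    (acc ++ pvWav q p) ++ pvB_ellipsis
  else if p = c then acc ++ pvAct q p
  else if p = T ∧ c + 3 < T ∧ c + 3 + 1 ≠ T then
    (acc ++ pvB_ellipsis) ++ pvWav q p
  else acc ++ pvWav q p

theorem pvEmitA_one (c T : Int) (q : String) (hT : 6 < T) (acc : String) :
    pvEmitA c T q acc 1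
      = acc ++ (pvItem c q 1 ++ (if 3 ≤ max 2 (c - 3) then pvB_ellipsis else "")) := by
  unfold pvEmitA
  by_cases h1 : c - 3 > 1 ∧ c - 3 - 1 ≠ 1
  · rw [if_pos ⟨rfl, h1⟩, if_pos (by omega : 3 ≤ max 2 (c - 3))]
    have hi : pvItem c q 1 = pvWav q 1 := by unfold pvItem; rw [if_neg (by omega)]
    rw [hi, String.append_assoc]
  · rw [if_neg (fun h => h1 h.2), if_neg (by omega : ¬ (3 ≤ max 2 (c - 3)))]
    by_cases hc : (1 : Int) = c
    · rw [if_pos hc]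
      unfold pvItem
      rw [if_pos hc, String.append_empty]
    · rw [if_neg hc, if_neg (fun h => by omega)]
      unfold pvItem
      rw [if_neg hc, String.append_empty]

theorem pvEmitA_mid (c T : Int) (q : String) (p : Int) (h2 : 2 ≤ p) (hp : p ≤ T - 1)
    (acc : String) : pvEmitA c T q acc p = acc ++ pvItem c q p := by
  unfold pvEmitA pvItem
  rw [if_neg (fun h => by omega : ¬ (p = 1 ∧ c - 3 > 1 ∧ c - 3 - 1 ≠ 1))]
  by_cases hc : p = c
  · rw [if_pos hc, if_pos hc]
  · rw [if_neg hc, if_neg hc, if_neg (fun h => by omega : ¬ (p = T ∧ c + 3 < T ∧ c + 3 + 1 ≠ T))]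

theorem pvEmitA_T (c T : Int) (q : String) (hT : 6 < T) (acc : String) :
    pvEmitA c T q acc T
      = acc ++ ((if min (T - 1) (c + 3) ≤ T - 2 then pvB_ellipsis else "") ++ pvItem c q T) := by
  unfold pvEmitA
  rw [if_neg (fun h => by omega : ¬ (T = 1 ∧ c - 3 > 1 ∧ c - 3 - 1 ≠ 1))]
  by_cases h2 : c + 3 < T ∧ c + 3 + 1 ≠ T
  · rw [if_neg (by omega : ¬ (T = c)), if_pos ⟨rfl, h2⟩,
      if_pos (by omega : min (T - 1) (c + 3) ≤ T - 2)]
    have hi : pvItem c q T = pvWav q T := by unfold pvItem; rw [if_neg (by omega)]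
    rw [hi, String.append_assoc]
  · rw [if_neg (by omega : ¬ (min (T - 1) (c + 3) ≤ T - 2))]
    by_cases hc : T = c
    · rw [if_pos hc]
      unfold pvItem
      rw [if_pos hc, String.empty_append]
    · rw [if_neg hc, if_neg (fun h => h2 h.2)]
      unfold pvItem
      rw [if_neg hc, String.empty_append]

theorem pvA_page_big (c T : Int) (q : String) (hT : 6 < T) :
    pvA_page c T q = pvClosed c T q := by
  simp only [pvA_page]
  rw [if_pos (by omega : T > 3 * 2)]
  show (PySem.List.pyRange 1 (T + 1)).foldl (fun acc p =>
      if ([1, T] ++ PySem.List.pyRange (c - 3) (c + 3 + 1)).contains p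
      then pvEmitA c T q acc p else acc) ""
    = pvClosed c T q
  rw [PySem.List.foldl_if_eq_foldl_filter
    (p := fun p => ([1, T] ++ PySem.List.pyRange (c - 3) (c + 3 + 1)).contains p)
    (f := pvEmitA c T q)]
  rw [pv_filter_big c T hT]
  rw [List.foldl_append, List.foldl_append]
  simp only [List.foldl_cons, List.foldl_nil]
  rw [pvEmitA_one c T q hT ""]
  rw [PySem.List.foldl_congr_mem _ (pvEmitA c T q) (fun acc p => acc ++ pvItem c q p) _
    (by
      intro acc p hp
      rw [PySem.List.mem_pyRange_one] at hp
      exact pvEmitA_mid c T q p (by omega) (by omega) acc)]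
  rw [pv_foldl_strAcc (pvItem c q)]
  rw [pvEmitA_T c T q hT]
  unfold pvClosed pvRun
  simp [String.append_assoc, String.empty_append, String.append_empty]

theorem pvB_page_big (c T : Int) (q : String) (hT : 6 < T) :
    pvB_page c T q = pvClosed c T q := by
  rw [pvB_page_eq_gap, pv_shown_big c T hT]
  rw [List.foldl_append, List.foldl_append]
  simp only [List.foldl_cons, List.foldl_nil]
  have hstep2 : ∀ (s : String) (x : Int), pvGapStep c q (s, some x) T
      = ((s ++ (if T - x > 1 then pvB_ellipsis else "")) ++ pvB_li c q T, some T) :=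
    fun s x => rfl
  by_cases hmid : max 2 (c - 3) ≤ min (T - 1) (c + 3)
  · change (pvGapStep c q (List.foldl (pvGapStep c q) (("" ++ "") ++ pvB_li c q 1, some 1)
        (PySem.List.pyRange (max 2 (c - 3)) (min (T - 1) (c + 3) + 1))) T).1 = pvClosed c T q
    rw [pv_gapRun c q ((min (T - 1) (c + 3) - max 2 (c - 3)).toNat)
        (max 2 (c - 3)) (min (T - 1) (c + 3) + 1) 1 _ (by omega)]
    rw [hstep2]
    unfold pvClosed
    rw [pvB_li_eq, pvB_li_eq]
    by_cases hg1 : 3 ≤ max 2 (c - 3)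
    · rw [if_pos hg1, if_pos (by omega : max 2 (c - 3) - 1 > 1)]
      by_cases hg2 : min (T - 1) (c + 3) ≤ T - 2
      · rw [if_pos hg2, if_pos (by omega : T - (min (T - 1) (c + 3) + 1 - 1) > 1)]
        simp [String.append_assoc, String.empty_append, String.append_empty]
      · rw [if_neg hg2, if_neg (by omega : ¬ (T - (min (T - 1) (c + 3) + 1 - 1) > 1))]
        simp [String.append_assoc, String.empty_append, String.append_empty]
    · rw [if_neg hg1, if_neg (by omega : ¬ (max 2 (c - 3) - 1 > 1))]
      by_cases hg2 : min (T - 1) (c + 3) ≤ T - 2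
      · rw [if_pos hg2, if_pos (by omega : T - (min (T - 1) (c + 3) + 1 - 1) > 1)]
        simp [String.append_assoc, String.empty_append, String.append_empty]
      · rw [if_neg hg2, if_neg (by omega : ¬ (T - (min (T - 1) (c + 3) + 1 - 1) > 1))]
        simp [String.append_assoc, String.empty_append, String.append_empty]
  · have hnil : PySem.List.pyRange (max 2 (c - 3)) (min (T - 1) (c + 3) + 1) = [] :=
      PySem.List.pyRange_one_eq_nil (by omega)
    rw [hnil]
    simp only [List.foldl_nil]
    change (pvGapStep c q (("" ++ "") ++ pvB_li c q 1, some 1) T).1 = pvClosed c T q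
    rw [hstep2]
    unfold pvClosed
    rw [hnil, pvRun_nil, pvB_li_eq, pvB_li_eq]
    rw [if_pos (by omega : T - 1 > 1)]
    rcases (by omega :
        (3 ≤ max 2 (c - 3) ∧ ¬ (min (T - 1) (c + 3) ≤ T - 2))
        ∨ (¬ (3 ≤ max 2 (c - 3)) ∧ (min (T - 1) (c + 3) ≤ T - 2))) with ⟨h1, h2⟩ | ⟨h1, h2⟩
    · rw [if_pos h1, if_neg h2]
      simp [String.append_assoc, String.empty_append, String.append_empty]
    · rw [if_neg h1, if_pos h2]
      simp [String.append_assoc, String.empty_append, String.append_empty]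

theorem pv_page_small (c T : Int) (q : String) (hT : ¬ 6 < T) :
    pvA_page c T q = pvB_page c T q := by
  simp only [pvA_page]
  rw [if_neg (by omega : ¬ T > 3 * 2)]
  rw [PySem.List.foldl_congr_mem _ _ (fun acc p => acc ++ pvItem c q p) _
    (by intro acc p _; by_cases hc : p = c <;> simp [pvItem, pvAct, pvWav, hc])]
  rw [pvB_page_eq_gap]
  unfold pvB_shown
  rw [if_neg hT]
  by_cases h0 : T ≤ 0
  · rw [PySem.List.pyRange_one_eq_nil (by omega)]
    rfl
  · rw [PySem.List.pyRange_one_cons (by omega : (1 : Int) < T + 1)]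
    simp only [List.foldl_cons]
    by_cases h1 : T = 1
    · subst h1
      rw [PySem.List.pyRange_one_eq_nil (by omega : (1 : Int) + 1 ≤ 1 + 1)]
      simp only [List.foldl_nil]
      change "" ++ pvItem c q 1 = ("" ++ "") ++ pvB_li c q 1
      rw [pvB_li_eq]
      simp [String.empty_append, String.append_empty]
    · change List.foldl (fun acc p => acc ++ pvItem c q p) ("" ++ pvItem c q 1)
          (PySem.List.pyRange (1 + 1) (T + 1))
        = (List.foldl (pvGapStep c q) (("" ++ "") ++ pvB_li c q 1, some 1)
            (PySem.List.pyRange (1 + 1) (T + 1))).1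
      rw [pv_gapRun c q (T - 2).toNat (1 + 1) (T + 1) 1 _ (by omega)]
      rw [if_neg (by omega : ¬ ((1 : Int) + 1 - 1 > 1))]
      rw [pv_foldl_strAcc (pvItem c q), pvB_li_eq]
      unfold pvRun
      simp [String.empty_append, String.append_empty, String.append_assoc]

theorem pv_page_eq (c T : Int) (q : String) : pvA_page c T q = pvB_page c T q := by
  by_cases hT : 6 < T
  · rw [pvA_page_big c T q hT, pvB_page_big c T q hT]
  · exact pv_page_small c T q hT

-- ===== VERDICT (by name: the statement is the Claim_ definition above) =====
theorem helper_pager_spec : Claim_equal_helper_pager := by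
  intro c t l ps _ _
  unfold Spec_helper_pager
  simp only [helper_pager, helper_pager_alt]
  rw [pv_query_eq, pv_page_eq]
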